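-- pv_equiv track=rewrite | github.com/sunava/cognitive_robot_abstract_machine | pycram/demos/thesis/wikihow_eval/ontology.py | classify_object
-- ===== SOURCE A (Python) =====
-- from typing import Dict, Iterable, List, Optional, Sequence, Set, Tuple
--
-- OBJECT_CLASS_RULES: Sequence[Tuple[Set[str], str, str, Set[str]]] = (
--     (
--         {"carrot", "mango", "bread", "cucumber", "potato", "apple"},
--         "FoodItem",
--         "FoodMaterial",
--         {"separable", "cuttable", "mixable_if_processed"},
--     ),
--     (
--         {"batter", "salad", "dough"},
--         "FoodMixture",
--         "FoodMaterial",
--         {"mixable", "container_compatible"},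
--     ),
--     (
--         {"cement", "concrete", "paint"},
--         "ConstructionMaterial",
--         "ConstructionMaterial",
--         {"mixable"},
--     ),
--     (
--         {"water", "juice", "milk", "soup"},
--         "PourableLiquid",
--         "Liquid",
--         {"pourable", "mixable"},
--     ),
--     (
--         {"counter", "counters", "countertop", "window", "floor", "table"},
--         "Surface",
--         "RigidSurface",
--         {"wipe_target", "surface_contact"},
--     ),
--     (
--         {"hair", "beard", "nails"},
--         "BodyPart",
--         "LivingTissue",
--         {"animate_part", "cuttable"},
--     ),
--     (
--         {"hedge", "grass", "bush"},
--         "PlantPart",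
--         "PlantMaterial",
--         {"animate_part", "cuttable"},
--     ),
-- )
--
-- def _normalize(text: Optional[str]) -> str:
--     return (text or "").strip().lower()
--
-- def classify_object(object_text: str) -> Tuple[str, str, Set[str], List[str]]:
--     """Map an extracted object phrase to a coarse ontology class."""
--     normalized = _normalize(object_text)
--     notes: List[str] = []
--     for aliases, object_class, material_class, tags in OBJECT_CLASS_RULES:
--         if normalized in aliases:
--             notes.append(f"object_class={object_class}:lexicon_match")
--             return object_class, material_class, set(tags), notes
--     if normalized.endswith("s"):
--         singular = normalized[:-1]
--         for aliases, object_class, material_class, tags in OBJECT_CLASS_RULES: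
--             if singular in aliases:
--                 notes.append(f"object_class={object_class}:singularized")
--                 return object_class, material_class, set(tags), notes
--     notes.append("object_class=UnknownObject:default")
--     return "UnknownObject", "UnknownMaterial", set(), notes
-- ===== SOURCE B (Python) =====
-- from typing import Dict, List, Optional, Set, Tuple
--
-- OBJECT_CLASS_RULES = (
--     (
--         {"carrot", "mango", "bread", "cucumber", "potato", "apple"},
--         "FoodItem",
--         "FoodMaterial",
--         {"separable", "cuttable", "mixable_if_processed"},
--     ),
--     (
--         {"batter", "salad", "dough"},
--         "FoodMixture",
--         "FoodMaterial",
--         {"mixable", "container_compatible"},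
--     ),
--     (
--         {"cement", "concrete", "paint"},
--         "ConstructionMaterial",
--         "ConstructionMaterial",
--         {"mixable"},
--     ),
--     (
--         {"water", "juice", "milk", "soup"},
--         "PourableLiquid",
--         "Liquid",
--         {"pourable", "mixable"},
--     ),
--     (
--         {"counter", "counters", "countertop", "window", "floor", "table"},
--         "Surface",
--         "RigidSurface",
--         {"wipe_target", "surface_contact"},
--     ),
--     (
--         {"hair", "beard", "nails"},
--         "BodyPart",
--         "LivingTissue",
--         {"animate_part", "cuttable"},
--     ),
--     (
--         {"hedge", "grass", "bush"},
--         "PlantPart",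
--         "PlantMaterial",
--         {"animate_part", "cuttable"},
--     ),
-- )
--
-- # One flat alias -> rule dict built once from the rule table.
-- ALIAS_TO_RULE: Dict[str, Tuple[str, str, Set[str]]] = {}
-- for _aliases, _oc, _mc, _tags in OBJECT_CLASS_RULES:
--     for _alias in _aliases:
--         ALIAS_TO_RULE[_alias] = (_oc, _mc, _tags)
--
--
-- def classify_object(object_text: str) -> Tuple[str, str, Set[str], List[str]]:
--     """Map an extracted object phrase to a coarse ontology class."""
--     normalized = (object_text or "").strip().lower()
--     # one uniform candidate loop: the phrase itself, then (if plural) its singular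
--     candidates = [(normalized, "lexicon_match")]
--     if normalized.endswith("s"):
--         candidates.append((normalized[:-1], "singularized"))
--     for key, reason in candidates:
--         hit = ALIAS_TO_RULE.get(key)
--         if hit is not None:
--             object_class, material_class, tags = hit
--             return object_class, material_class, set(tags), [f"object_class={object_class}:{reason}"]
--     return "UnknownObject", "UnknownMaterial", set(), ["object_class=UnknownObject:default"]
-- ===== Notes on version B (the rewrite author's own statement) =====
-- stated objective: idiomatic
-- what changed: A scans every rule's alias set per call (twice on the singularization path) with duplicated exact/singular return branches; B precomputes one flat module-level alias->(object_class, material_class, tags) dict from OBJECT_CLASS_RULES once, builds a candidate list [(phrase,'lexicon_match')] + optional [(singular,'singularized')], and resolves it with one uniform lookup loop.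
import Mathlib
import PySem

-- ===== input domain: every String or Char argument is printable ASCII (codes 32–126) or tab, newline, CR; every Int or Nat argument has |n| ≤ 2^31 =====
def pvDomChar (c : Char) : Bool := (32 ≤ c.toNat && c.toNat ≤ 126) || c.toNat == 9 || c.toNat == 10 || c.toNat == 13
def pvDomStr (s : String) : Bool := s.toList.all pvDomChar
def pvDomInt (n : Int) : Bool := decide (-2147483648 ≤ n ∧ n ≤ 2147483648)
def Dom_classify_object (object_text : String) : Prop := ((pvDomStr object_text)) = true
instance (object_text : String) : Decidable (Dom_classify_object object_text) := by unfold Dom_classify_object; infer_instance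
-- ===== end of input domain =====

-- B replaces A's two duplicated per-rule alias-set scans by one flat alias→rule dict built once
-- plus a single uniform candidate-list loop (idiomatic restructuring); same return value.

-- shared module constant OBJECT_CLASS_RULES (alias set, object_class, material_class, tag set)
def pvRules : List (List String × String × String × List String) :=
  [ (["carrot", "mango", "bread", "cucumber", "potato", "apple"],
       "FoodItem", "FoodMaterial", ["separable", "cuttable", "mixable_if_processed"]),
    (["batter", "salad", "dough"],
       "FoodMixture", "FoodMaterial", ["mixable", "container_compatible"]),
    (["cement", "concrete", "paint"],
       "ConstructionMaterial", "ConstructionMaterial", ["mixable"]),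
    (["water", "juice", "milk", "soup"],
       "PourableLiquid", "Liquid", ["pourable", "mixable"]),
    (["counter", "counters", "countertop", "window", "floor", "table"],
       "Surface", "RigidSurface", ["wipe_target", "surface_contact"]),
    (["hair", "beard", "nails"],
       "BodyPart", "LivingTissue", ["animate_part", "cuttable"]),
    (["hedge", "grass", "bush"],
       "PlantPart", "PlantMaterial", ["animate_part", "cuttable"]) ]

-- ===== PORT A =====
-- _normalize(text): (text or "").strip().lower(); for a str argument this is text.strip().lower()
def pvNormalize (text : String) : String := PySem.Str.lower (PySem.Str.strip text)

-- A's 'for aliases, object_class, material_class, tags in OBJECT_CLASS_RULES: if normalized in aliases: return …'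
def pvRuleScan (normalized : String) :
    List (List String × String × String × List String) → Option (String × String × List String)
  | [] => none
  | (aliases, oc, mc, tags) :: rest =>
      if aliases.contains normalized then some (oc, mc, tags) else pvRuleScan normalized rest

def classify_object (object_text : String) : String × String × List String × List String :=
  let normalized := pvNormalize object_text
  match pvRuleScan normalized pvRules with
  | some (oc, mc, tags) =>
      (oc, mc, PySem.Set.ofList tags, ["object_class=" ++ oc ++ ":lexicon_match"])
  | none =>
      if PySem.Str.endswith normalized "s" then
        let singular := String.ofList (PySem.List.slice normalized.toList none (some (-1)))
        match pvRuleScan singular pvRules with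
        | some (oc, mc, tags) =>
            (oc, mc, PySem.Set.ofList tags, ["object_class=" ++ oc ++ ":singularized"])
        | none => ("UnknownObject", "UnknownMaterial", [], ["object_class=UnknownObject:default"])
      else ("UnknownObject", "UnknownMaterial", [], ["object_class=UnknownObject:default"])

-- ===== PORT B =====
-- module-level 'for aliases, oc, mc, tags in OBJECT_CLASS_RULES: for alias in aliases: ALIAS_TO_RULE[alias] = (oc, mc, tags)'
def pvAliasToRule : PySem.Dict String (String × String × List String) :=
  pvRules.foldl
    (fun d r => r.1.foldl (fun d al => d.insert al (r.2.1, r.2.2.1, r.2.2.2)) d)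
    PySem.Dict.empty

-- the candidate list B builds: the phrase itself, then (if it ends in 's') its singular
def pvCandidates (normalized : String) : List (String × String) :=
  if PySem.Str.endswith normalized "s" then
    [(normalized, "lexicon_match"),
     (String.ofList (PySem.List.slice normalized.toList none (some (-1))), "singularized")]
  else [(normalized, "lexicon_match")]

-- B's 'for key, reason in candidates: hit = ALIAS_TO_RULE.get(key); if hit is not None: return …'
def pvResolve : List (String × String) → String × String × List String × List String
  | [] => ("UnknownObject", "UnknownMaterial", [], ["object_class=UnknownObject:default"])
  | (key, reason) :: rest =>
      match PySem.Dict.get? pvAliasToRule key with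
      | some (oc, mc, tags) =>
          (oc, mc, PySem.Set.ofList tags, ["object_class=" ++ oc ++ ":" ++ reason])
      | none => pvResolve rest

def classify_object_alt (object_text : String) : String × String × List String × List String :=
  pvResolve (pvCandidates (PySem.Str.lower (PySem.Str.strip object_text)))

-- ===== PRECONDITION & SPEC =====
def Spec_classify_object (object_text : String) (out : String × String × List String × List String) : Prop := out = classify_object_alt object_text
instance (object_text : String) (out : String × String × List String × List String) : Decidable (Spec_classify_object object_text out) := by unfold Spec_classify_object; infer_instance

-- ===== CLAIM (what is proved, stated in full; the proofs are below) =====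
def Claim_equal_classify_object : Prop := ∀ (object_text : String), Dom_classify_object object_text → Spec_classify_object object_text (classify_object object_text)

-- ===== LEMMAS AND PROOFS =====

-- the flat dict lookup agrees with A's rule-by-rule alias scan on every string
theorem pvGet_eq_scan (s : String) :
    PySem.Dict.get? pvAliasToRule s = pvRuleScan s pvRules := by
  by_cases h : s ∈ ["carrot", "mango", "bread", "cucumber", "potato", "apple", "batter", "salad", "dough", "cement", "concrete", "paint", "water", "juice", "milk", "soup", "counter", "counters", "countertop", "window", "floor", "table", "hair", "beard", "nails", "hedge", "grass", "bush"]
  · fin_cases h <;> decide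
  · simp only [List.mem_cons, List.not_mem_nil, or_false, not_or] at h
    obtain ⟨h1,h2,h3,h4,h5,h6,h7,h8,h9,h10,h11,h12,h13,h14,h15,h16,h17,h18,h19,h20,h21,h22,h23,h24,h25,h26,h27,h28⟩ := h
    simp [pvAliasToRule, pvRules, pvRuleScan, PySem.Dict.get?_insert,
      h1,h2,h3,h4,h5,h6,h7,h8,h9,h10,h11,h12,h13,h14,h15,h16,h17,h18,h19,h20,h21,h22,h23,h24,h25,h26,h27,h28]

-- ===== VERDICT (by name: the statement is the Claim_ definition above) =====
theorem classify_object_spec : Claim_equal_classify_object := by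
  intro t _
  unfold Spec_classify_object classify_object classify_object_alt pvNormalize pvCandidates
  by_cases he : PySem.Str.endswith (PySem.Str.lower (PySem.Str.strip t)) "s" = true
  · simp only [he, if_true, pvResolve, pvGet_eq_scan]
    cases pvRuleScan (PySem.Str.lower (PySem.Str.strip t)) pvRules with
    | some r =>
        obtain ⟨oc, mc, tags⟩ := r
        simp [String.append_assoc]
    | none =>
        cases pvRuleScan (String.ofList (PySem.List.slice (PySem.Str.lower (PySem.Str.strip t)).toList none (some (-1)))) pvRules with
        | some r => obtain ⟨oc, mc, tags⟩ := r; simp [String.append_assoc]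
        | none => simp
  · simp only [he, if_false, Bool.false_eq_true, pvResolve, pvGet_eq_scan]
    cases pvRuleScan (PySem.Str.lower (PySem.Str.strip t)) pvRules with
    | some r => obtain ⟨oc, mc, tags⟩ := r; simp [String.append_assoc]
    | none => simp
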